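-- pv_equiv track=rewrite | github.com/felixwzh/deeptype_playground | module/menconn.py | mention_index
-- ===== SOURCE A (Python) =====
-- from operator import itemgetter
--
-- def mention_index(ts, ss, sep=' '):
--     con = [[] for t in ts]
--     fin = [False for t in ts]
--     for i, s in enumerate(ss):
--         for j, t in enumerate(ts):
--             if fin[j] is True:
--                 continue
--             if con[j]:
--                 tmp = itemgetter(*con[j])(ss)
--                 if isinstance(tmp, tuple):
--                     tmp = list(tmp) + [ss[i]]
--                 elif isinstance(tmp, str):
--                     arr = []
--                     arr.append(tmp)
--                     tmp = arr + [ss[i]]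
--                 ndl = sep.join(tmp)
--             else:
--                 ndl = ss[i]
--             if ndl == t:
--                 con[j].append(i)
--                 fin[j] = True
--             elif t.startswith(ss[i]) and not t.startswith(ndl):
--                 con[j] = [i]
--                 if ss[i] == t:
--                     fin[j] = True
--             elif t.startswith(ndl):
--                 con[j].append(i)
--             else:
--                 con[j] = []
--     return con
-- ===== SOURCE B (Python) =====
-- def mention_index(ts, ss, sep=' '):
--     # Per-target single pass keeping a matched-prefix length p into t instead of
--     # rejoining the candidate tokens (itemgetter + sep.join) on every step.
--     # Invariant: sep.join(ss[k] for k in idxs) == t[:p] whenever idxs is non-empty.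
--     out = []
--     for t in ts:
--         idxs = []
--         p = 0
--         for i, s in enumerate(ss):
--             if not idxs:
--                 if s == t:
--                     idxs = [i]
--                     break
--                 elif t.startswith(s):
--                     idxs = [i]
--                     p = len(s)
--                 else:
--                     idxs = []
--             else:
--                 ext = sep + s
--                 if t.startswith(ext, p):
--                     idxs.append(i)
--                     if len(t) == p + len(ext):
--                         break
--                     p += len(ext)
--                 elif t.startswith(s):
--                     idxs = [i]
--                     p = len(s)
--                     if s == t:
--                         break
--                 else:
--                     idxs = []
--                     p = 0
--         out.append(idxs)
--     return out
-- ===== Notes on version B (the rewrite author's own statement) =====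
-- stated objective: faster
-- what changed: Instead of rejoining the whole candidate token list with itemgetter+sep.join on every (token,target) step, B does one pass per target keeping a matched-prefix length p into the target and compares only the new extension sep+token at offset p (t.startswith(ext, p)).
import Mathlib
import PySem

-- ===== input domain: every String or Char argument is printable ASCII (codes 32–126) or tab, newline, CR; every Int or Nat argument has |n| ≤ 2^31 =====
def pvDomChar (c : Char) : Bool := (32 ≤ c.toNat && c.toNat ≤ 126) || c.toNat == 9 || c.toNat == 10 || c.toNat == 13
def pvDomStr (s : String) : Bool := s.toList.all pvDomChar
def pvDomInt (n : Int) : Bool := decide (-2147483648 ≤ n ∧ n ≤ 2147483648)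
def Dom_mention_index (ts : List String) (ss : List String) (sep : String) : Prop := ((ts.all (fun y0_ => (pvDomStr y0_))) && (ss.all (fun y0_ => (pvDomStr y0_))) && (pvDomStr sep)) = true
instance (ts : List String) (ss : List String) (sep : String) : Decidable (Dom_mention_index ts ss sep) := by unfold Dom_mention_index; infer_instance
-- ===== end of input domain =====

-- B replaces A's per-step itemgetter rejoin by a per-target single pass that keeps a
-- matched-prefix length into the target and compares only the new extension at that offset.


-- ===== PORT A =====
-- ss[k] for an index A itself put into con (always in range, so the getD default is never used)
def pvLookupA (ss : List String) (k : Int) : String := (PySem.List.pyGet? ss k).getD ""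

-- tmp = itemgetter(*con)(ss); both isinstance branches end as (list of looked-up tokens) + [s]; ndl = sep.join(tmp)
def pvNdlA (ss : List String) (sep : String) (con : List Int) (s : String) : String :=
  PySem.Str.join sep (con.map (pvLookupA ss) ++ [s])

-- the body of A's inner loop for one target t (state = (con[j], fin[j]))
def pvStepA (ss : List String) (sep : String) (i : Int) (s : String) (t : String)
    (st : List Int × Bool) : List Int × Bool :=
  if st.2 then st                                   -- if fin[j] is True: continue
  else
    let ndl := if st.1 = [] then s else pvNdlA ss sep st.1 s
    if ndl = t then (st.1 ++ [i], true)
    else if PySem.Str.startswith t s && !(PySem.Str.startswith t ndl) then ([i], s == t)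
    else if PySem.Str.startswith t ndl then (st.1 ++ [i], st.2)
    else ([], st.2)

def mention_index (ts : List String) (ss : List String) (sep : String) : List (List Int) :=
  -- con = [[] for t in ts]; fin = [False for t in ts]; the per-j updates are pointwise,
  -- so the inner 'for j, t in enumerate(ts)' is a map over the zipped state
  (((PySem.List.enumerate ss).foldl
      (fun st is => (st.zip ts).map (fun q => pvStepA ss sep is.1 is.2 q.2 q.1))
      (ts.map (fun _ => (([] : List Int), false)))).map (·.1))

-- ===== PORT B =====
-- one pass over ss for a single target t; p = matched prefix length into t.
-- t.startswith(x, p) is ported exactly as startswith on t[p:] (= drop p, also for p past the end).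
def pvGoB (sep : List Char) (t : List Char) :
    List (List Char) → Int → List Int → Nat → List Int
  | [], _, idxs, _ => idxs
  | s :: rest, i, idxs, p =>
    if idxs = [] then
      if s = t then [i]                                      -- idxs = [i]; break
      else if PySem.Chars.startswith t s then pvGoB sep t rest (i+1) [i] s.length
      else pvGoB sep t rest (i+1) [] p
    else
      let ext := sep ++ s
      if PySem.Chars.startswith (t.drop p) ext then
        if t.length = p + ext.length then idxs ++ [i]        -- append; break
        else pvGoB sep t rest (i+1) (idxs ++ [i]) (p + ext.length)
      else if PySem.Chars.startswith t s then
        if s = t then [i]                                    -- idxs = [i]; break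
        else pvGoB sep t rest (i+1) [i] s.length
      else pvGoB sep t rest (i+1) [] 0

def mention_index_alt (ts : List String) (ss : List String) (sep : String) : List (List Int) :=
  ts.map (fun t => pvGoB sep.toList t.toList (ss.map String.toList) 0 [] 0)

-- ===== PRECONDITION & SPEC =====
def Spec_mention_index (ts : List String) (ss : List String) (sep : String) (out : List (List Int)) : Prop := out = mention_index_alt ts ss sep
instance (ts : List String) (ss : List String) (sep : String) (out : List (List Int)) : Decidable (Spec_mention_index ts ss sep out) := by unfold Spec_mention_index; infer_instance

-- ===== CLAIM (what is proved, stated in full; the proofs are below) =====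
def Claim_equal_mention_index : Prop := ∀ (ts : List String) (ss : List String) (sep : String), Dom_mention_index ts ss sep → Spec_mention_index ts ss sep (mention_index ts ss sep)

-- ===== LEMMAS AND PROOFS =====

-- once fin[j] is set, A's fold leaves the j-state untouched
lemma foldA_fin (ss : List String) (sep t : String) :
    ∀ (l : List (Int × String)) (c : List Int),
      l.foldl (fun st is => pvStepA ss sep is.1 is.2 t st) (c, true) = (c, true) := by
  intro l
  induction l with
  | nil => intro c; rfl
  | cons x xs ih => intro c; simpa [pvStepA] using ih c

-- the map-over-zip step applied to a state of the shape ts.map f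
lemma zip_map_step (f : String → List Int × Bool) (h : String → List Int × Bool → List Int × Bool) :
    ∀ (ts : List String),
      ((ts.map f).zip ts).map (fun q => h q.2 q.1) = ts.map (fun t => h t (f t)) := by
  intro ts
  induction ts with
  | nil => rfl
  | cons t ts ih => simp [ih]

-- A's shared fold decomposes into one independent fold per target
lemma foldA_map (ss : List String) (sep : String) :
    ∀ (ts : List String) (l : List (Int × String)) (f : String → List Int × Bool),
      l.foldl (fun st is => (st.zip ts).map (fun q => pvStepA ss sep is.1 is.2 q.2 q.1)) (ts.map f)
      = ts.map (fun t => l.foldl (fun st is => pvStepA ss sep is.1 is.2 t st) (f t)) := by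
  intro ts l
  induction l with
  | nil => intro f; rfl
  | cons x xs ih =>
    intro f
    simp only [List.foldl_cons]
    rw [zip_map_step f (fun t st => pvStepA ss sep x.1 x.2 t st) ts,
        ih (fun t => pvStepA ss sep x.1 x.2 t (f t))]

-- join over a non-empty snoc
lemma join_snoc (sep : List Char) :
    ∀ (xs : List (List Char)) (y : List Char), xs ≠ [] →
      PySem.Chars.join sep (xs ++ [y]) = PySem.Chars.join sep xs ++ sep ++ y := by
  intro xs
  induction xs with
  | nil => intro y hy; exact absurd rfl hy
  | cons a as ih =>
    intro y _
    cases as with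
    | nil => simp [PySem.Chars.join_singleton, PySem.Chars.join_cons_cons]
    | cons b bs =>
      have hih := ih y (by simp)
      simp only [List.cons_append] at hih ⊢
      rw [PySem.Chars.join_cons_cons, PySem.Chars.join_cons_cons, hih]
      simp

-- the joined candidate, on the char level
def pvJ (ss : List String) (sep : String) (c : List Int) : List Char :=
  (PySem.Str.join sep (c.map (pvLookupA ss))).toList

lemma ndl_toList (ss : List String) (sep : String) (c : List Int) (s : String) (hc : c ≠ []) :
    (pvNdlA ss sep c s).toList = pvJ ss sep c ++ sep.toList ++ s.toList := by
  unfold pvNdlA pvJ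
  rw [PySem.Str.toList_join, PySem.Str.toList_join]
  simp only [List.map_append, List.map_map, List.map_cons, List.map_nil]
  rw [join_snoc sep.toList _ s.toList (by simpa using hc)]

lemma pvJ_snoc (ss : List String) (sep : String) (c : List Int) (k : Int) (hc : c ≠ []) :
    pvJ ss sep (c ++ [k]) = pvJ ss sep c ++ sep.toList ++ (pvLookupA ss k).toList := by
  have h1 : pvJ ss sep (c ++ [k]) = (pvNdlA ss sep c (pvLookupA ss k)).toList := by
    unfold pvJ pvNdlA
    rw [List.map_append, List.map_singleton]
  rw [h1, ndl_toList _ _ _ _ hc]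

lemma pvJ_single (ss : List String) (sep : String) (k : Int) :
    pvJ ss sep [k] = (pvLookupA ss k).toList := by
  unfold pvJ
  rw [PySem.Str.toList_join]
  simp [PySem.Chars.join_singleton]

-- a prefix extended past a split point
lemma prefix_split (l : List Char) (p : Nat) (e : List Char) :
    (l.take p ++ e <+: l) ↔ e <+: l.drop p := by
  constructor
  · intro h
    apply (List.prefix_append_right_inj (l.take p)).mp
    rwa [List.take_append_drop]
  · intro h
    have := (List.prefix_append_right_inj (l.take p)).mpr h
    rwa [List.take_append_drop] at this

lemma prefix_split_eq (l : List Char) (p : Nat) (e : List Char) (hp : p ≤ l.length) :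
    (l.take p ++ e = l) ↔ (e <+: l.drop p ∧ l.length = p + e.length) := by
  constructor
  · intro h
    have hdr : e = l.drop p := by
      apply List.append_cancel_left (as := l.take p)
      rw [h, List.take_append_drop]
    constructor
    · rw [hdr]
    · have := congrArg List.length h
      simp [List.length_take] at this
      omega
  · rintro ⟨h1, h2⟩
    have hlen : e.length = (l.drop p).length := by
      simp [List.length_drop]; omega
    rw [List.IsPrefix.eq_of_length h1 hlen, List.take_append_drop]

-- A's step on an empty candidate
lemma stepA_empty (ss : List String) (sep : String) (i : Int) (s t : String) :
    pvStepA ss sep i s t ([], false) =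
      if s = t then ([i], true)
      else if PySem.Chars.startswith t.toList s.toList = true then ([i], false)
      else ([], false) := by
  unfold pvStepA
  by_cases hst : s = t
  · simp [hst]
  · by_cases hsw : PySem.Chars.startswith t.toList s.toList = true
    · simp [hst, hsw, PySem.Str.startswith_eq]
    · simp [hst, hsw, PySem.Str.startswith_eq]

-- A's step on a non-empty candidate whose join is t.take p
lemma stepA_nonempty (ss : List String) (sep : String) (i : Int) (s t : String)
    (c : List Int) (p : Nat) (hc : c ≠ [])
    (hJ : pvJ ss sep c = t.toList.take p) (hp : p ≤ t.toList.length) :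
    pvStepA ss sep i s t (c, false) =
      if PySem.Chars.startswith (t.toList.drop p) (sep.toList ++ s.toList) = true then
        (if t.toList.length = p + (sep.toList ++ s.toList).length then (c ++ [i], true)
         else (c ++ [i], false))
      else if PySem.Chars.startswith t.toList s.toList = true then ([i], s == t)
      else ([], false) := by
  have hndlL : (pvNdlA ss sep c s).toList = t.toList.take p ++ (sep.toList ++ s.toList) := by
    rw [ndl_toList _ _ _ _ hc, hJ, List.append_assoc]
  have heq : (pvNdlA ss sep c s = t) ↔
      (PySem.Chars.startswith (t.toList.drop p) (sep.toList ++ s.toList) = true ∧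
       t.toList.length = p + (sep.toList ++ s.toList).length) := by
    rw [← String.toList_inj, hndlL, PySem.Chars.startswith_iff]
    exact prefix_split_eq t.toList p _ hp
  have hswb : PySem.Chars.startswith t.toList (pvNdlA ss sep c s).toList =
      PySem.Chars.startswith (t.toList.drop p) (sep.toList ++ s.toList) := by
    rw [Bool.eq_iff_iff, PySem.Chars.startswith_iff, PySem.Chars.startswith_iff, hndlL]
    exact prefix_split t.toList p _
  unfold pvStepA
  by_cases h1 : PySem.Chars.startswith (t.toList.drop p) (sep.toList ++ s.toList) = true
  · by_cases h2 : t.toList.length = p + (sep.toList ++ s.toList).length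
    · have : pvNdlA ss sep c s = t := heq.mpr ⟨h1, h2⟩
      have h2' : t.length = p + (sep.length + s.length) := by simpa using h2
      simp [hc, this, h1, h2']
    · have hne : ¬ pvNdlA ss sep c s = t := fun h => h2 (heq.mp h).2
      have h2' : ¬ t.length = p + (sep.length + s.length) := by simpa using h2
      simp [hc, hne, hswb, h1, h2']
  · have hne : ¬ pvNdlA ss sep c s = t := fun h => h1 (heq.mp h).1
    by_cases h3 : PySem.Chars.startswith t.toList s.toList = true
    · simp [hc, hne, hswb, h1, h3, PySem.Str.startswith_eq]
    · simp [hc, hne, hswb, h1, h3, PySem.Str.startswith_eq]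

-- the per-target equivalence: A's fold over the remaining suffix equals B's recursion
lemma per_target (ss : List String) (sep t : String) :
    ∀ (rest : List String) (i0 : Nat) (c : List Int) (p : Nat),
      rest = ss.drop i0 →
      (c ≠ [] → pvJ ss sep c = t.toList.take p ∧ p ≤ t.toList.length) →
      ((PySem.List.enumerate rest (i0 : Int)).foldl
          (fun st is => pvStepA ss sep is.1 is.2 t st) (c, false)).1
        = pvGoB sep.toList t.toList (rest.map String.toList) (i0 : Int) c p := by
  intro rest
  induction rest with
  | nil => intro i0 c p _ _; simp [pvGoB, PySem.List.enumerate_nil]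
  | cons s rest ih =>
    intro i0 c p hdrop hinv
    -- the current token s is ss[i0]
    have hlen0 := congrArg List.length hdrop
    simp [List.length_drop] at hlen0
    have hlt : i0 < ss.length := by omega
    have hget : ss[i0]? = some s := by
      have h0 : (ss.drop i0)[0]? = some s := by rw [← hdrop]; rfl
      rw [List.getElem?_drop] at h0
      simpa using h0
    have hss : ss[i0] = s := by
      rw [List.getElem?_eq_getElem hlt] at hget
      exact Option.some.inj hget
    have hlook : pvLookupA ss ((i0 : Nat) : Int) = s := by
      simp [pvLookupA, hlt, hss]
    have hrest : rest = ss.drop (i0 + 1) := by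
      have := congrArg List.tail hdrop
      simpa [List.tail_drop] using this
    have hcast : ((i0 : Nat) : Int) + 1 = (((i0 + 1 : Nat)) : Int) := by push_cast; ring
    rw [PySem.List.enumerate_cons, List.foldl_cons, List.map_cons]
    by_cases hc : c = []
    · subst hc
      rw [stepA_empty]
      by_cases hst : s = t
      · rw [if_pos hst]
        have hB : s.toList = t.toList := by rw [hst]
        simp [pvGoB, hB, foldA_fin]
      · rw [if_neg hst]
        have hB : ¬ s.toList = t.toList := fun h => hst (String.toList_inj.mp h)
        by_cases hsw : PySem.Chars.startswith t.toList s.toList = true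
        · rw [if_pos hsw]
          have hpre : s.toList <+: t.toList := (PySem.Chars.startswith_iff _ _).mp hsw
          have hInv : ([(i0 : Int)] : List Int) ≠ [] →
              pvJ ss sep [(i0 : Int)] = t.toList.take s.toList.length ∧
              s.toList.length ≤ t.toList.length := by
            intro _
            exact ⟨by rw [pvJ_single, hlook, ← List.prefix_iff_eq_take.mp hpre],
                   List.IsPrefix.length_le hpre⟩
          have hIH := ih (i0 + 1) [(i0 : Int)] s.toList.length hrest hInv
          rw [hcast]
          simpa [pvGoB, hB, hsw] using hIH
        · rw [if_neg hsw]
          have hIH := ih (i0 + 1) [] p hrest (fun h => absurd rfl h)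
          rw [hcast]
          simpa [pvGoB, hB, hsw] using hIH
    · obtain ⟨hJ, hp⟩ := hinv hc
      rw [stepA_nonempty ss sep _ s t c p hc hJ hp]
      by_cases h1 : PySem.Chars.startswith (t.toList.drop p) (sep.toList ++ s.toList) = true
      · rw [if_pos h1]
        have hpre : (sep.toList ++ s.toList) <+: t.toList.drop p :=
          (PySem.Chars.startswith_iff _ _).mp h1
        by_cases h2 : t.toList.length = p + (sep.toList ++ s.toList).length
        · rw [if_pos h2]
          simp [pvGoB, hc, h1, h2, foldA_fin]
        · rw [if_neg h2]
          have hInv : c ++ [(i0 : Int)] ≠ [] →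
              pvJ ss sep (c ++ [(i0 : Int)]) =
                t.toList.take (p + (sep.toList ++ s.toList).length) ∧
              p + (sep.toList ++ s.toList).length ≤ t.toList.length := by
            intro _
            constructor
            · rw [pvJ_snoc ss sep c _ hc, hJ, hlook, List.append_assoc, List.take_add]
              exact congrArg (fun x => List.take p t.toList ++ x)
                (List.prefix_iff_eq_take.mp hpre)
            · have h4 := List.IsPrefix.length_le hpre
              rw [List.length_drop] at h4
              omega
          have hIH := ih (i0 + 1) (c ++ [(i0 : Int)]) (p + (sep.toList ++ s.toList).length)
            hrest hInv
          have h2' : ¬ t.length = p + (sep.length + s.length) := by simpa using h2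
          rw [hcast]
          simpa [pvGoB, hc, h1, h2'] using hIH
      · rw [if_neg h1]
        by_cases h3 : PySem.Chars.startswith t.toList s.toList = true
        · rw [if_pos h3]
          have hpre : s.toList <+: t.toList := (PySem.Chars.startswith_iff _ _).mp h3
          by_cases hst : s = t
          · have hB : s.toList = t.toList := by rw [hst]
            have hbeq : (s == t) = true := by simp [hst]
            rw [hbeq]
            simp [pvGoB, hc, h1, h3, foldA_fin]
            simp [hB]
          · have hB : ¬ s.toList = t.toList := fun h => hst (String.toList_inj.mp h)
            have hbeq : (s == t) = false := by simp [hst]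
            rw [hbeq]
            have hInv : ([(i0 : Int)] : List Int) ≠ [] →
                pvJ ss sep [(i0 : Int)] = t.toList.take s.toList.length ∧
                s.toList.length ≤ t.toList.length := by
              intro _
              exact ⟨by rw [pvJ_single, hlook, ← List.prefix_iff_eq_take.mp hpre],
                     List.IsPrefix.length_le hpre⟩
            have hIH := ih (i0 + 1) [(i0 : Int)] s.toList.length hrest hInv
            rw [hcast]
            simpa [pvGoB, hc, h1, h3, hB] using hIH
        · rw [if_neg h3]
          have hIH := ih (i0 + 1) [] 0 hrest (fun h => absurd rfl h)
          rw [hcast]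
          simpa [pvGoB, hc, h1, h3] using hIH

-- ===== VERDICT (by name: the statement is the Claim_ definition above) =====
theorem mention_index_spec : Claim_equal_mention_index := by
  intro ts ss sep _
  unfold Spec_mention_index mention_index mention_index_alt
  rw [foldA_map ss sep ts (PySem.List.enumerate ss) (fun _ => (([] : List Int), false)),
      List.map_map]
  refine List.map_congr_left ?_
  intro t _
  have := per_target ss sep t ss 0 [] 0 (by simp) (fun h => absurd rfl h)
  simpa using this
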